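-- pv_equiv track=rewrite | github.com/sophiahuangg/data-automation | plots/city-reports/employment.py | _axis_line_breaks_elem
-- ===== SOURCE A (Python) =====
-- def _axis_line_breaks_elem(elem: str, max_chars: int = 15):
--     """Adds line breaks to axis values so they can be plotted horizontally"""
--     splt = elem.split(" ")
--     res = ""
--     tmp = ""
--     for word in splt:
--         res += f"{word} "
--         tmp += f"{word} "
--         charcount = len(tmp.strip())
--         if charcount >= max_chars:
--             res += "<br>"
--             tmp = ""
--             charcount = 0
--
--     return res.strip()
-- ===== SOURCE B (Python) =====
-- def _axis_line_breaks_elem(elem: str, max_chars: int = 15):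
--     """Adds line breaks to axis values so they can be plotted horizontally"""
--     def first_line(words):
--         # scan for the shortest prefix whose stripped text reaches max_chars
--         chunk = ""
--         for i, w in enumerate(words):
--             chunk += w + " "
--             if len(chunk.strip()) >= max_chars:
--                 return chunk + "<br>", words[i + 1:], True
--         return chunk, [], False
--
--     def render(words):
--         if not words:
--             return ""
--         chunk, rest, broke = first_line(words)
--         return chunk + render(rest) if broke else chunk
--
--     return render(elem.split(" ")).strip()
-- ===== Notes on version B (the rewrite author's own statement) =====
-- stated objective: alternative
-- what changed: Replaced A's single flat loop with two running string accumulators (result and line buffer, break tag spliced in mid-loop) by a recursive line-at-a-time decomposition: a scanner extracts the first completed line and the remaining words, and the renderer recurses on that suffix, concatenating line-plus-break-tag segments.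
import Mathlib
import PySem

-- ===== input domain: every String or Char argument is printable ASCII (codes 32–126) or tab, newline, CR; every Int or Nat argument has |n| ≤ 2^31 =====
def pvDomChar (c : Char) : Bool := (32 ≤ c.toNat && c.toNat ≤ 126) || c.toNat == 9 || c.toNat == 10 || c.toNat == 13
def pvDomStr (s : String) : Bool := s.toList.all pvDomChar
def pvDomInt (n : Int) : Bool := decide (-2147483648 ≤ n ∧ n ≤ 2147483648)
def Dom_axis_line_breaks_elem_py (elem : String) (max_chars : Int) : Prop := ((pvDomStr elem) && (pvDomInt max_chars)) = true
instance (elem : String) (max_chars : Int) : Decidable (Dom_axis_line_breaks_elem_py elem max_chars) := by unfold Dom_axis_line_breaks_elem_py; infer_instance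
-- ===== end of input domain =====

-- B replaces A's flat loop over all words with two running string accumulators by a
-- recursive line-at-a-time decomposition (scan off the first completed line, recurse on
-- the remaining words); alternative structure, same cost.

-- ===== PORT A =====
-- one loop iteration of A: state (res, tmp), next word -> new state
def pvStepA (max_chars : Int) (st : List Char × List Char) (word : List Char) : List Char × List Char :=
  let res := st.1 ++ word ++ [' ']
  let tmp := st.2 ++ word ++ [' ']
  if (max_chars ≤ ((PySem.Chars.strip tmp).length : Int)) then
    (res ++ ['<', 'b', 'r', '>'], [])
  else
    (res, tmp)

def axis_line_breaks_elem_py (elem : String) (max_chars : Int) : String :=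
  let splt := PySem.Chars.splitOn elem.toList [' ']
  let st := splt.foldl (pvStepA max_chars) ([], [])
  String.ofList (PySem.Chars.strip st.1)

-- ===== PORT B =====
-- B's first_line: scan words, growing chunk, until the stripped chunk reaches max_chars;
-- return (chunk [+ "<br>"], remaining words, whether a break fired)
def pvFirstLine (max_chars : Int) (chunk : List Char) :
    List (List Char) → List Char × List (List Char) × Bool
  | [] => (chunk, [], false)
  | w :: ws =>
    let c := chunk ++ w ++ [' ']
    if (max_chars ≤ ((PySem.Chars.strip c).length : Int)) then
      (c ++ ['<', 'b', 'r', '>'], ws, true)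
    else
      pvFirstLine max_chars c ws

-- (termination helper for pvRenderB; cited by its decreasing_by)
lemma pvFirstLine_rest_le (max_chars : Int) :
    ∀ (ws : List (List Char)) (chunk : List Char),
      (pvFirstLine max_chars chunk ws).2.1.length ≤ ws.length := by
  intro ws
  induction ws with
  | nil => intro chunk; simp [pvFirstLine]
  | cons w ws ih =>
    intro chunk
    simp only [pvFirstLine]
    split
    · simp
    · exact le_trans (ih _) (Nat.le_succ _)

-- B's render: first completed line, then recurse on the rest
def pvRenderB (max_chars : Int) : List (List Char) → List Char
  | [] => []
  | w :: ws =>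
    let r := pvFirstLine max_chars [] (w :: ws)
    if r.2.2 then r.1 ++ pvRenderB max_chars r.2.1 else r.1
termination_by ws => ws.length
decreasing_by
  have h : (pvFirstLine max_chars [] (w :: ws)).2.1.length ≤ ws.length := by
    simp only [pvFirstLine]
    split
    · simp
    · exact pvFirstLine_rest_le _ _ _
  exact Nat.lt_of_le_of_lt h (Nat.lt_succ_self _)

def axis_line_breaks_elem_py_alt (elem : String) (max_chars : Int) : String :=
  let splt := PySem.Chars.splitOn elem.toList [' ']
  String.ofList (PySem.Chars.strip (pvRenderB max_chars splt))

-- ===== PRECONDITION & SPEC =====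
def Spec_axis_line_breaks_elem_py (elem : String) (max_chars : Int) (out : String) : Prop := out = axis_line_breaks_elem_py_alt elem max_chars
instance (elem : String) (max_chars : Int) (out : String) : Decidable (Spec_axis_line_breaks_elem_py elem max_chars out) := by unfold Spec_axis_line_breaks_elem_py; infer_instance

-- ===== CLAIM (what is proved, stated in full; the proofs are below) =====
def Claim_equal_axis_line_breaks_elem_py : Prop := ∀ (elem : String) (max_chars : Int), Dom_axis_line_breaks_elem_py elem max_chars → Spec_axis_line_breaks_elem_py elem max_chars (axis_line_breaks_elem_py elem max_chars)

-- ===== LEMMAS AND PROOFS =====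

-- the characters A's loop emits after state (·, tmp) on the remaining words
def pvEmit (max_chars : Int) (tmp : List Char) : List (List Char) → List Char
  | [] => []
  | w :: ws =>
    let t := tmp ++ w ++ [' ']
    if (max_chars ≤ ((PySem.Chars.strip t).length : Int)) then
      w ++ [' '] ++ ['<', 'b', 'r', '>'] ++ pvEmit max_chars [] ws
    else
      w ++ [' '] ++ pvEmit max_chars t ws

-- A's fold appends pvEmit to its res accumulator
lemma pv_foldA_emit (max_chars : Int) :
    ∀ (ws : List (List Char)) (res tmp : List Char),
      (ws.foldl (pvStepA max_chars) (res, tmp)).1 = res ++ pvEmit max_chars tmp ws := by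
  intro ws
  induction ws with
  | nil => intro res tmp; simp [pvEmit]
  | cons w ws ih =>
    intro res tmp
    simp only [List.foldl_cons, pvStepA, pvEmit]
    by_cases h : (max_chars ≤ ((PySem.Chars.strip (tmp ++ w ++ [' '])).length : Int))
    · rw [if_pos h, if_pos h, ih]; simp
    · rw [if_neg h, if_neg h, ih]; simp

-- B's first_line + render of a word list equals chunk ++ pvEmit from that chunk
lemma pv_renderB_emit (max_chars : Int) :
    ∀ (ws : List (List Char)) (chunk : List Char),
      (let r := pvFirstLine max_chars chunk ws;
       if r.2.2 then r.1 ++ pvRenderB max_chars r.2.1 else r.1)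
        = chunk ++ pvEmit max_chars chunk ws := by
  intro ws
  induction ws with
  | nil => intro chunk; simp [pvFirstLine, pvEmit]
  | cons w ws ih =>
    intro chunk
    simp only [pvFirstLine, pvEmit]
    by_cases h : (max_chars ≤ ((PySem.Chars.strip (chunk ++ w ++ [' '])).length : Int))
    · rw [if_pos h, if_pos h]
      have hrest : pvRenderB max_chars ws = pvEmit max_chars [] ws := by
        cases ws with
        | nil => simp [pvRenderB, pvEmit]
        | cons v vs =>
          rw [pvRenderB]
          simpa using ih []
      simp [hrest]
    · rw [if_neg h, if_neg h, ih]
      simp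

-- ===== VERDICT (by name: the statement is the Claim_ definition above) =====
theorem axis_line_breaks_elem_py_spec : Claim_equal_axis_line_breaks_elem_py := by
  intro elem max_chars _
  unfold Spec_axis_line_breaks_elem_py axis_line_breaks_elem_py axis_line_breaks_elem_py_alt
  simp only []
  rw [pv_foldA_emit]
  congr 1
  cases hs : PySem.Chars.splitOn elem.toList [' '] with
  | nil => simp [pvRenderB, pvEmit]
  | cons w ws =>
    rw [pvRenderB]
    simpa using congrArg PySem.Chars.strip (pv_renderB_emit max_chars (w :: ws) []).symm
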